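-- pv_equiv track=rewrite | github.com/p-hoffmann/trexsql-ext | plugins/notebook/src/kernels/pyodide/pyqe/api/query.py | get_entities_from_config_paths
-- ===== SOURCE A (Python) =====
-- def get_entities_from_config_paths(column_config_paths=[]):
--     dynamic_entities = {}
--     for col in column_config_paths:
--         if col.startswith("patient.interactions"):
--             entity_name = col.split(".")[2]
--             if entity_name in dynamic_entities:
--                 dynamic_entities[entity_name].append(col)
--             else:
--                 dynamic_entities[entity_name] = [col]
--
--     return dynamic_entities
-- ===== SOURCE B (Python) =====
-- def get_entities_from_config_paths(column_config_paths=[]):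
--     interaction_cols = [c for c in column_config_paths
--                         if c.startswith("patient.interactions")]
--     names = list(dict.fromkeys(c.split(".")[2] for c in interaction_cols))
--     return {n: [c for c in interaction_cols if c.split(".")[2] == n]
--             for n in names}
-- ===== Notes on version B (the rewrite author's own statement) =====
-- stated objective: alternative
-- what changed: Replaces the single dict-accumulating loop by a filter-then-group decomposition: filter the interaction paths once, take the first-occurrence-ordered distinct entity names via dict.fromkeys, and build each group with a comprehension over the filtered list.
import Mathlib
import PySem

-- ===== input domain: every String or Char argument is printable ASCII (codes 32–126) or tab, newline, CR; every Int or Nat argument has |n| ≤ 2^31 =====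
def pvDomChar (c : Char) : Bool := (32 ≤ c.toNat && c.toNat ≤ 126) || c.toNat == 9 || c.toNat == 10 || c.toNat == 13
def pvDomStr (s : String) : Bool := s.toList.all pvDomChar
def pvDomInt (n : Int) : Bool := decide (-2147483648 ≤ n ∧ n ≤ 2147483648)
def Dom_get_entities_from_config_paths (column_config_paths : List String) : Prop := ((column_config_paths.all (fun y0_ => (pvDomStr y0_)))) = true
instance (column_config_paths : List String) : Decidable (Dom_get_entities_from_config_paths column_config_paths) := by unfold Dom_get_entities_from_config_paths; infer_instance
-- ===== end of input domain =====

-- B replaces A's dict-accumulating loop by filter → ordered-distinct names → per-name comprehension (alternative decomposition, same result).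

-- ===== PORT A =====
-- col.split(".") (sep is the non-empty literal ".", so split? is always some)
def pvSplitDot (col : String) : List String := (PySem.Str.split? col ".").getD []

-- col.split(".")[2]; total form, exact under Pre_ (Python raises IndexError out of range)
def pvEntityName (col : String) : String := PySem.List.pyGetD (pvSplitDot col) 2 ""

def get_entities_from_config_paths (column_config_paths : List String) : List (String × List String) :=
  (column_config_paths.foldl
    (fun (d : PySem.Dict String (List String)) col =>
      if PySem.Str.startswith col "patient.interactions" then
        let entity_name := pvEntityName col
        if d.contains entity_name then
          d.modify entity_name [] (fun v => v ++ [col])   -- dynamic_entities[entity_name].append(col)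
        else
          d.insert entity_name [col]
      else d)
    PySem.Dict.empty).items

-- ===== PORT B =====
def get_entities_from_config_paths_alt (column_config_paths : List String) : List (String × List String) :=
  let interaction_cols := column_config_paths.filter
    (fun c => PySem.Str.startswith c "patient.interactions")
  let names := PySem.List.dedup (interaction_cols.map pvEntityName)
  names.map (fun n => (n, interaction_cols.filter (fun c => pvEntityName c == n)))

-- ===== PRECONDITION & SPEC =====
-- Pre_ excludes exactly the inputs on which A raises IndexError: a path that starts with
-- "patient.interactions" but has fewer than three "."-separated parts, so col.split(".")[2] raises.
def Pre_get_entities_from_config_paths (column_config_paths : List String) : Prop :=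
  ∀ col ∈ column_config_paths,
    PySem.Str.startswith col "patient.interactions" = true → 3 ≤ (pvSplitDot col).length
instance (column_config_paths : List String) : Decidable (Pre_get_entities_from_config_paths column_config_paths) := by unfold Pre_get_entities_from_config_paths; infer_instance

def pvWitness_get_entities_from_config_paths : List String :=
  ["patient.interactions.visit.id", "other.path", "patient.interactions.visit.start", "patient.interactions.obs.x"]

def Spec_get_entities_from_config_paths (column_config_paths : List String) (out : List (String × List String)) : Prop := out = get_entities_from_config_paths_alt column_config_paths
instance (column_config_paths : List String) (out : List (String × List String)) : Decidable (Spec_get_entities_from_config_paths column_config_paths out) := by unfold Spec_get_entities_from_config_paths; infer_instance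

-- ===== CLAIM (what is proved, stated in full; the proofs are below) =====
def Claim_equal_get_entities_from_config_paths : Prop := ∀ (column_config_paths : List String), Dom_get_entities_from_config_paths column_config_paths → Pre_get_entities_from_config_paths column_config_paths → Spec_get_entities_from_config_paths column_config_paths (get_entities_from_config_paths column_config_paths)

-- ===== LEMMAS AND PROOFS =====

-- A's two branches are together exactly Dict.modify with default [].
theorem pv_step_eq (d : PySem.Dict String (List String)) (n c : String) :
    (if d.contains n then d.modify n [] (fun v => v ++ [c]) else d.insert n [c])
      = d.modify n [] (fun v => v ++ [c]) := by
  by_cases h : d.contains n = true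
  · simp [h]
  · rw [if_neg h]
    unfold PySem.Dict.modify
    rw [PySem.Dict.getD_of_not_contains _ _ (by simpa using h)]
    rfl

theorem pv_main (cols : List String) :
    get_entities_from_config_paths cols = get_entities_from_config_paths_alt cols := by
  unfold get_entities_from_config_paths get_entities_from_config_paths_alt
  have hstep :
      (cols.foldl
        (fun (d : PySem.Dict String (List String)) col =>
          if PySem.Str.startswith col "patient.interactions" then
            let entity_name := pvEntityName col
            if d.contains entity_name then d.modify entity_name [] (fun v => v ++ [col])
            else d.insert entity_name [col]
          else d)
        PySem.Dict.empty)
      = ((cols.filter (fun c => PySem.Str.startswith c "patient.interactions")).foldl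
          (fun (d : PySem.Dict String (List String)) col =>
            d.modify (pvEntityName col) [] (fun v => v ++ [col]))
          PySem.Dict.empty) := by
    rw [List.foldl_filter]
    apply PySem.List.foldl_congr_mem
    intro d c _
    by_cases hp : PySem.Str.startswith c "patient.interactions" = true
    · rw [if_pos hp, if_pos hp]
      exact pv_step_eq d (pvEntityName c) c
    · rw [if_neg hp, if_neg hp]
  rw [hstep]
  set fs := cols.filter (fun c => PySem.Str.startswith c "patient.interactions") with hfs
  have hnodup :
      ((fs.foldl (fun (d : PySem.Dict String (List String)) col =>
          d.modify (pvEntityName col) [] (fun v => v ++ [col])) PySem.Dict.empty)).keys.Nodup := by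
    exact PySem.Dict.nodup_keys_foldl_modify_key fs pvEntityName []
      (fun _ col v => v ++ [col]) PySem.Dict.empty (by simp [PySem.Dict.empty, PySem.Dict.keys])
  rw [PySem.Dict.items_eq_map_keys _ hnodup []]
  have hkeys :
      ((fs.foldl (fun (d : PySem.Dict String (List String)) col =>
          d.modify (pvEntityName col) [] (fun v => v ++ [col])) PySem.Dict.empty)).keys
        = PySem.List.dedup (fs.map pvEntityName) := by
    rw [PySem.Dict.keys_foldl_modify_key fs pvEntityName [] (fun _ col v => v ++ [col])]
    simp [PySem.Dict.empty, PySem.Dict.keys, PySem.Set.update_nil_left, PySem.List.dedup_eq_ofList]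
  rw [hkeys]
  apply List.map_congr_left
  intro n _
  have hfold :
      (fs.foldl (fun (d : PySem.Dict String (List String)) col =>
          d.modify (pvEntityName col) [] (fun v => v ++ [col])) PySem.Dict.empty)
      = ((fs.map (fun c => (pvEntityName c, c))).foldl
          (fun (d : PySem.Dict String (List String)) p =>
            d.modify p.1 [] (fun v => v ++ [p.2])) PySem.Dict.empty) := by
    rw [List.foldl_map]
  rw [hfold, PySem.Dict.getD_foldl_modify_append]
  simp [PySem.Dict.getD_empty, List.filter_map, Function.comp_def]

-- ===== VERDICT (by name: the statement is the Claim_ definition above) =====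
theorem get_entities_from_config_paths_spec : Claim_equal_get_entities_from_config_paths := by
  intro cols _ _
  unfold Spec_get_entities_from_config_paths
  exact pv_main cols
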